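-- pv_equiv track=rewrite | github.com/rexologue/evo-ai-agents-labs | agent-purchaser/src/a2a_wrapper.py | _longest_suffix_prefix_len
-- ===== SOURCE A (Python) =====
-- from typing import Dict, Any, AsyncGenerator, List, Tuple, Optional
--
-- def _longest_suffix_prefix_len(s: str, tokens: Tuple[str, ...]) -> int:
--     """
--     Длина максимального суффикса s, который является префиксом одного из tokens,
--     но НЕ равен полному токену.
--     Это позволяет безопасно стримить, не "протекают" стоп-токены через границы чанков.
--     """
--     if not s:
--         return 0
--
--     best = 0
--     n = len(s)
--     for tok in tokens:
--         # держим только "недопрефикс", т.е. < len(tok)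
--         max_k = min(len(tok) - 1, n)
--         # ищем самый длинный k
--         for k in range(max_k, 0, -1):
--             if s.endswith(tok[:k]):
--                 if k > best:
--                     best = k
--                 break
--     return best
-- ===== SOURCE B (Python) =====
-- def _longest_suffix_prefix_len(s, tokens):
--     """Length of the longest suffix of s that is a proper prefix of some token.
--
--     Different decomposition than the original: scan candidate lengths k from
--     longest to shortest (capped by the longest token, since a proper prefix is
--     shorter than its token) and return at the first k any token accepts,
--     instead of keeping a running per-token best.
--     """
--     n = len(s)
--     kmax = min(n, max(map(len, tokens), default=0) - 1)
--     for k in range(kmax, 0, -1):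
--         suf = s[n - k:]
--         for tok in tokens:
--             if k < len(tok) and tok.startswith(suf):
--                 return k
--     return 0
-- ===== Notes on version B (the rewrite author's own statement) =====
-- stated objective: faster
-- what changed: B inverts the loop nesting: one scan of candidate suffix lengths from longest to shortest, capped by the longest token, returning at the first length any token accepts; this removes A's per-token downward endswith scan and the running 'best' accumulator.
import Mathlib
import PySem

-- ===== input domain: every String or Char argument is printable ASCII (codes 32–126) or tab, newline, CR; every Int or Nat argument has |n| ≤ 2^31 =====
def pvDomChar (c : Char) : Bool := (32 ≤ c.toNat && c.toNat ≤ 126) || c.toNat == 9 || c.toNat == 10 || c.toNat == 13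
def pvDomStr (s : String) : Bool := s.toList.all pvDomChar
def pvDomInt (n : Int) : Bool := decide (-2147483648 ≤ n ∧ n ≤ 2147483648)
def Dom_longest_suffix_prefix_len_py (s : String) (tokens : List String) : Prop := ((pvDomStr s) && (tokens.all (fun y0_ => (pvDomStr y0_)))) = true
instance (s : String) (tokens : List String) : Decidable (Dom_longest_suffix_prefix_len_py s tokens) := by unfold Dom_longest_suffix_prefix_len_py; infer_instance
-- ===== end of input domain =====

-- B inverts the loop nesting (scan suffix lengths longest-first, return at the first
-- length any token accepts) instead of A's per-token downward scan with a running best.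

-- ===== PORT A =====
-- inner loop: 'for k in range(max_k, 0, -1): if s.endswith(tok[:k]): (if k > best: best = k); break'
def pvAtok (s tok : String) : List Int → Int → Int
  | [], best => best
  | k :: ks, best =>
    if PySem.Str.endswith s (PySem.Str.slice tok none (some k)) = true then
      (if k > best then k else best)
    else pvAtok s tok ks best

def longest_suffix_prefix_len_py (s : String) (tokens : List String) : Int :=
  if s = "" then 0
  else
    let n := PySem.Str.len s
    tokens.foldl (fun best tok =>
      pvAtok s tok (PySem.List.pyRange (min (PySem.Str.len tok - 1) n) 0 (-1)) best) 0

-- ===== PORT B =====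
-- 'any(k < len(tok) and tok.startswith(suf) for tok in tokens)'
def pvBany (suf : String) (k : Int) : List String → Bool
  | [] => false
  | tok :: rest =>
    (decide (k < PySem.Str.len tok) && PySem.Str.startswith tok suf) || pvBany suf k rest

-- 'for k in range(n, 0, -1): suf = s[n-k:]; if any(...): return k' then 'return 0'
def pvBscan (s : String) (tokens : List String) : List Int → Int
  | [] => 0
  | k :: ks =>
    if pvBany (PySem.Str.slice s (some (PySem.Str.len s - k)) none) k tokens = true then k
    else pvBscan s tokens ks

def longest_suffix_prefix_len_py_alt (s : String) (tokens : List String) : Int :=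
  let n := PySem.Str.len s
  -- 'kmax = min(n, max(map(len, tokens), default=0) - 1)'; since lengths are ≥ 0,
  -- Python's max-with-default-0 is foldl max 0 over the lengths (exact here)
  let kmax := min n ((tokens.map PySem.Str.len).foldl max 0 - 1)
  pvBscan s tokens (PySem.List.pyRange kmax 0 (-1))

-- ===== PRECONDITION & SPEC =====
def Spec_longest_suffix_prefix_len_py (s : String) (tokens : List String) (out : Int) : Prop := out = longest_suffix_prefix_len_py_alt s tokens
instance (s : String) (tokens : List String) (out : Int) : Decidable (Spec_longest_suffix_prefix_len_py s tokens out) := by unfold Spec_longest_suffix_prefix_len_py; infer_instance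

-- ===== CLAIM (what is proved, stated in full; the proofs are below) =====
def Claim_equal_longest_suffix_prefix_len_py : Prop := ∀ (s : String) (tokens : List String), Dom_longest_suffix_prefix_len_py s tokens → Spec_longest_suffix_prefix_len_py s tokens (longest_suffix_prefix_len_py s tokens)

-- ===== LEMMAS AND PROOFS =====

-- 'suffix of s of length k is a proper prefix of tok' (for 1 ≤ k ≤ |s|)
def pvMT (s tok : String) (k : Int) : Prop :=
  k < (tok.toList.length : Int) ∧
    s.toList.drop (s.toList.length - k.toNat) = tok.toList.take k.toNat

def pvM (s : String) (tokens : List String) (k : Int) : Prop :=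
  ∃ tok ∈ tokens, pvMT s tok k

theorem pvA_cond (s tok : String) (k : Int) (h1 : 1 ≤ k)
    (_h2 : k ≤ (s.toList.length : Int)) (h3 : k < (tok.toList.length : Int)) :
    (PySem.Str.endswith s (PySem.Str.slice tok none (some k)) = true) ↔ pvMT s tok k := by
  have hk0 : (0 : Int) ≤ k := by omega
  have hkt : k.toNat ≤ tok.toList.length := by omega
  rw [PySem.Str.endswith, PySem.Str.slice, PySem.Chars.slice, PySem.List.slice_to _ hk0,
    PySem.Chars.endswith, String.toList_ofList, List.isSuffixOf_iff_suffix,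
    List.suffix_iff_eq_drop, List.length_take, Nat.min_eq_left hkt]
  constructor
  · intro h; exact ⟨h3, h.symm⟩
  · intro h; exact h.2.symm

theorem pvB_cond (s tok : String) (k : Int) (h1 : 1 ≤ k)
    (_h2 : k ≤ (s.toList.length : Int)) :
    ((decide (k < PySem.Str.len tok) &&
      PySem.Str.startswith tok (PySem.Str.slice s (some (PySem.Str.len s - k)) none)) = true)
      ↔ pvMT s tok k := by
  have h0 : (0 : Int) ≤ (s.toList.length : Int) - k := by omega
  have htn : ((s.toList.length : Int) - k).toNat = s.toList.length - k.toNat := by omega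
  rw [Bool.and_eq_true, decide_eq_true_eq, PySem.Str.len_eq, PySem.Str.len_eq,
    PySem.Str.startswith, PySem.Str.slice, PySem.Chars.slice,
    PySem.List.slice_from _ h0, PySem.Chars.startswith,
    String.toList_ofList, List.isPrefixOf_iff_prefix, List.prefix_iff_eq_take,
    htn, List.length_drop]
  have hlen : s.toList.length - (s.toList.length - k.toNat) = k.toNat := by omega
  rw [hlen]
  exact Iff.rfl

theorem pvBany_iff (s : String) (tokens : List String) (k : Int) (h1 : 1 ≤ k)
    (h2 : k ≤ (s.toList.length : Int)) :
    (pvBany (PySem.Str.slice s (some (PySem.Str.len s - k)) none) k tokens = true)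
      ↔ pvM s tokens k := by
  induction tokens with
  | nil => simp [pvBany, pvM]
  | cons tok rest ih =>
    rw [pvBany, Bool.or_eq_true, ih]
    constructor
    · rintro (h | h)
      · exact ⟨tok, List.mem_cons_self, (pvB_cond s tok k h1 h2).mp h⟩
      · obtain ⟨t, ht, hm⟩ := h; exact ⟨t, List.mem_cons_of_mem _ ht, hm⟩
    · rintro ⟨t, ht, hm⟩
      rcases List.mem_cons.mp ht with rfl | ht'
      · exact Or.inl ((pvB_cond s t k h1 h2).mpr hm)
      · exact Or.inr ⟨t, ht', hm⟩

theorem pvBscan_spec (s : String) (tokens : List String) (j : Nat)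
    (hj : (j : Int) ≤ (s.toList.length : Int)) :
    (pvBscan s tokens (PySem.List.pyRange (j : Int) 0 (-1)) = 0 ∨
      (1 ≤ pvBscan s tokens (PySem.List.pyRange (j : Int) 0 (-1)) ∧
       pvBscan s tokens (PySem.List.pyRange (j : Int) 0 (-1)) ≤ (j : Int) ∧
       pvM s tokens (pvBscan s tokens (PySem.List.pyRange (j : Int) 0 (-1))))) ∧
    ∀ k : Int, 1 ≤ k → k ≤ (j : Int) → pvM s tokens k →
      k ≤ pvBscan s tokens (PySem.List.pyRange (j : Int) 0 (-1)) := by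
  induction j with
  | zero =>
    rw [PySem.List.pyRange_neg_one_eq_nil (by omega), pvBscan]
    exact ⟨Or.inl rfl, fun k hk1 hk2 _ => absurd hk2 (by omega)⟩
  | succ j ih =>
    have hcons : PySem.List.pyRange ((j + 1 : Nat) : Int) 0 (-1)
        = ((j + 1 : Nat) : Int) :: PySem.List.pyRange ((j : Nat) : Int) 0 (-1) := by
      have h : ((j + 1 : Nat) : Int) - 1 = ((j : Nat) : Int) := by push_cast; ring
      rw [PySem.List.pyRange_neg_one_cons (by push_cast; omega), h]
    rw [hcons, pvBscan]
    have h1 : (1 : Int) ≤ ((j + 1 : Nat) : Int) := by push_cast; omega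
    have h2 : ((j + 1 : Nat) : Int) ≤ (s.toList.length : Int) := hj
    by_cases hc : pvBany (PySem.Str.slice s (some (PySem.Str.len s - ((j + 1 : Nat) : Int))) none)
        ((j + 1 : Nat) : Int) tokens = true
    · rw [if_pos hc]
      refine ⟨Or.inr ⟨h1, le_refl _, (pvBany_iff s tokens _ h1 h2).mp hc⟩, ?_⟩
      intro k hk1 hk2 _; exact hk2
    · rw [if_neg hc]
      have hj' : ((j : Nat) : Int) ≤ (s.toList.length : Int) := by push_cast at hj ⊢; omega
      obtain ⟨ihl, ihr⟩ := ih hj'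
      refine ⟨?_, ?_⟩
      · rcases ihl with h | ⟨x1, x2, x3⟩
        · exact Or.inl h
        · exact Or.inr ⟨x1, by push_cast at x2 ⊢; omega, x3⟩
      intro k hk1 hk2 hM
      by_cases hk : k = ((j + 1 : Nat) : Int)
      · exact absurd ((pvBany_iff s tokens _ h1 h2).mpr (hk ▸ hM)) hc
      · exact ihr k hk1 (by push_cast at hk2 ⊢; omega) hM

theorem pvAtok_spec (s tok : String) (j : Nat) (best : Int)
    (hjt : (j : Int) ≤ (tok.toList.length : Int) - 1)
    (hjn : (j : Int) ≤ (s.toList.length : Int)) :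
    best ≤ pvAtok s tok (PySem.List.pyRange (j : Int) 0 (-1)) best ∧
    (pvAtok s tok (PySem.List.pyRange (j : Int) 0 (-1)) best = best ∨
      (1 ≤ pvAtok s tok (PySem.List.pyRange (j : Int) 0 (-1)) best ∧
       pvAtok s tok (PySem.List.pyRange (j : Int) 0 (-1)) best ≤ (j : Int) ∧
       pvMT s tok (pvAtok s tok (PySem.List.pyRange (j : Int) 0 (-1)) best))) ∧
    ∀ k : Int, 1 ≤ k → k ≤ (j : Int) → pvMT s tok k →
      k ≤ pvAtok s tok (PySem.List.pyRange (j : Int) 0 (-1)) best := by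
  induction j generalizing best with
  | zero =>
    rw [PySem.List.pyRange_neg_one_eq_nil (by omega), pvAtok]
    exact ⟨le_refl _, Or.inl rfl, fun k hk1 hk2 _ => absurd hk2 (by omega)⟩
  | succ j ih =>
    have hcons : PySem.List.pyRange ((j + 1 : Nat) : Int) 0 (-1)
        = ((j + 1 : Nat) : Int) :: PySem.List.pyRange ((j : Nat) : Int) 0 (-1) := by
      have h : ((j + 1 : Nat) : Int) - 1 = ((j : Nat) : Int) := by push_cast; ring
      rw [PySem.List.pyRange_neg_one_cons (by push_cast; omega), h]
    rw [hcons, pvAtok]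
    have h1 : (1 : Int) ≤ ((j + 1 : Nat) : Int) := by push_cast; omega
    have h3 : ((j + 1 : Nat) : Int) < (tok.toList.length : Int) := by push_cast at hjt ⊢; omega
    by_cases hc : PySem.Str.endswith s (PySem.Str.slice tok none (some ((j + 1 : Nat) : Int))) = true
    · rw [if_pos hc]
      have hmt : pvMT s tok ((j + 1 : Nat) : Int) := (pvA_cond s tok _ h1 hjn h3).mp hc
      by_cases hb : ((j + 1 : Nat) : Int) > best
      · rw [if_pos hb]
        exact ⟨by omega, Or.inr ⟨h1, le_refl _, hmt⟩, fun k _ hk2 _ => hk2⟩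
      · rw [if_neg hb]
        exact ⟨le_refl _, Or.inl rfl, fun k _ hk2 _ => by omega⟩
    · rw [if_neg hc]
      have hjt' : ((j : Nat) : Int) ≤ (tok.toList.length : Int) - 1 := by push_cast at hjt ⊢; omega
      have hjn' : ((j : Nat) : Int) ≤ (s.toList.length : Int) := by push_cast at hjn ⊢; omega
      obtain ⟨ih1, ih2, ih3⟩ := ih best hjt' hjn'
      refine ⟨ih1, ?_, ?_⟩
      · rcases ih2 with h | ⟨x1, x2, x3⟩
        · exact Or.inl h
        · exact Or.inr ⟨x1, by push_cast at x2 ⊢; omega, x3⟩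
      intro k hk1 hk2 hM
      by_cases hk : k = ((j + 1 : Nat) : Int)
      · exact absurd ((pvA_cond s tok _ h1 hjn h3).mpr (hk ▸ hM)) hc
      · exact ih3 k hk1 (by push_cast at hk2 ⊢; omega) hM

theorem pvAfold_spec (s : String) (ts : List String) (best : Int) :
    best ≤ ts.foldl (fun b tok =>
        pvAtok s tok (PySem.List.pyRange (min (PySem.Str.len tok - 1) (PySem.Str.len s)) 0 (-1)) b) best ∧
    (ts.foldl (fun b tok =>
        pvAtok s tok (PySem.List.pyRange (min (PySem.Str.len tok - 1) (PySem.Str.len s)) 0 (-1)) b) best = best ∨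
      ∃ tok ∈ ts, 1 ≤ ts.foldl (fun b tok =>
        pvAtok s tok (PySem.List.pyRange (min (PySem.Str.len tok - 1) (PySem.Str.len s)) 0 (-1)) b) best ∧
        ts.foldl (fun b tok =>
        pvAtok s tok (PySem.List.pyRange (min (PySem.Str.len tok - 1) (PySem.Str.len s)) 0 (-1)) b) best ≤ (s.toList.length : Int) ∧
        pvMT s tok (ts.foldl (fun b tok =>
        pvAtok s tok (PySem.List.pyRange (min (PySem.Str.len tok - 1) (PySem.Str.len s)) 0 (-1)) b) best)) ∧
    ∀ tok ∈ ts, ∀ k : Int, 1 ≤ k → k ≤ (s.toList.length : Int) → pvMT s tok k →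
      k ≤ ts.foldl (fun b tok =>
        pvAtok s tok (PySem.List.pyRange (min (PySem.Str.len tok - 1) (PySem.Str.len s)) 0 (-1)) b) best := by
  induction ts generalizing best with
  | nil =>
    exact ⟨le_refl _, Or.inl rfl, fun tok htok => absurd htok (List.not_mem_nil)⟩
  | cons tok ts ih =>
    rw [List.foldl_cons]
    set m : Int := min (PySem.Str.len tok - 1) (PySem.Str.len s) with hm
    have hml : m ≤ (tok.toList.length : Int) - 1 := by
      rw [hm, PySem.Str.len_eq]; exact min_le_left _ _
    have hmr : m ≤ (s.toList.length : Int) := by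
      rw [hm, PySem.Str.len_eq tok, PySem.Str.len_eq s]; exact min_le_right _ _
    have hhead : ∀ k : Int, 1 ≤ k → k ≤ (s.toList.length : Int) → pvMT s tok k → k ≤ m := by
      intro k hk1 hk2 hM
      rw [hm, PySem.Str.len_eq, PySem.Str.len_eq]
      have := hM.1
      omega
    by_cases hm0 : m ≤ 0
    · have hnil : PySem.List.pyRange m 0 (-1) = [] := PySem.List.pyRange_neg_one_eq_nil hm0
      rw [hnil, pvAtok]
      obtain ⟨ih1, ih2, ih3⟩ := ih best
      refine ⟨ih1, ?_, ?_⟩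
      · rcases ih2 with h | ⟨t, ht, h⟩
        · exact Or.inl h
        · exact Or.inr ⟨t, List.mem_cons_of_mem _ ht, h⟩
      · intro t ht k hk1 hk2 hM
        rcases List.mem_cons.mp ht with rfl | ht'
        · exact absurd (hhead k hk1 hk2 hM) (by omega)
        · exact ih3 t ht' k hk1 hk2 hM
    · have hj : ((m.toNat : Nat) : Int) = m := Int.toNat_of_nonneg (by omega)
      obtain ⟨a1, a2, a3⟩ := pvAtok_spec s tok m.toNat best (by rw [hj]; exact hml) (by rw [hj]; exact hmr)
      rw [hj] at a1 a2 a3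
      obtain ⟨ih1, ih2, ih3⟩ := ih (pvAtok s tok (PySem.List.pyRange m 0 (-1)) best)
      refine ⟨le_trans a1 ih1, ?_, ?_⟩
      · rcases ih2 with h | ⟨t, ht, h⟩
        · rcases a2 with h' | ⟨hb1, hb2, hb3⟩
          · exact Or.inl (h.trans h')
          · exact Or.inr ⟨tok, List.mem_cons_self, by rw [h]; exact ⟨hb1, le_trans hb2 hmr, hb3⟩⟩
        · exact Or.inr ⟨t, List.mem_cons_of_mem _ ht, h⟩
      · intro t ht k hk1 hk2 hM
        rcases List.mem_cons.mp ht with rfl | ht'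
        · exact le_trans (a3 k hk1 (hhead k hk1 hk2 hM) hM) ih1
        · exact ih3 t ht' k hk1 hk2 hM

theorem pvfoldl_max_spec (l : List Int) (a : Int) :
    a ≤ l.foldl max a ∧ ∀ x ∈ l, x ≤ l.foldl max a := by
  induction l generalizing a with
  | nil => exact ⟨le_refl _, fun x hx => absurd hx List.not_mem_nil⟩
  | cons y l ih =>
    rw [List.foldl_cons]
    obtain ⟨h1, h2⟩ := ih (max a y)
    refine ⟨le_trans (le_max_left a y) h1, ?_⟩
    intro x hx
    rcases List.mem_cons.mp hx with rfl | hx'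
    · exact le_trans (le_max_right a x) h1
    · exact h2 x hx'

-- ===== VERDICT (by name: the statement is the Claim_ definition above) =====
theorem longest_suffix_prefix_len_py_spec : Claim_equal_longest_suffix_prefix_len_py := by
  intro s tokens _dom
  unfold Spec_longest_suffix_prefix_len_py longest_suffix_prefix_len_py longest_suffix_prefix_len_py_alt
  by_cases hs : s = ""
  · subst hs
    rw [if_pos rfl]
    show (0 : Int) = pvBscan "" tokens (PySem.List.pyRange
      (min (PySem.Str.len "") ((tokens.map PySem.Str.len).foldl max 0 - 1)) 0 (-1))
    have h0 : PySem.Str.len "" = 0 := by rw [PySem.Str.len_eq]; simp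
    rw [h0, PySem.List.pyRange_neg_one_eq_nil (min_le_left 0 _), pvBscan]
  · rw [if_neg hs]
    show tokens.foldl (fun best tok =>
        pvAtok s tok (PySem.List.pyRange (min (PySem.Str.len tok - 1) (PySem.Str.len s)) 0 (-1)) best) 0
      = pvBscan s tokens (PySem.List.pyRange
        (min (PySem.Str.len s) ((tokens.map PySem.Str.len).foldl max 0 - 1)) 0 (-1))
    obtain ⟨a1, a2, a3⟩ := pvAfold_spec s tokens 0
    obtain ⟨hm0, hmx⟩ := pvfoldl_max_spec (tokens.map PySem.Str.len) 0
    simp only [PySem.Str.len_eq] at a1 a2 a3 ⊢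
    by_cases hK0 : min ((s.toList.length : Int)) ((tokens.map PySem.Str.len).foldl max 0 - 1) ≤ 0
    · rw [PySem.List.pyRange_neg_one_eq_nil hK0, pvBscan]
      rcases a2 with h | ⟨tokA, htA, hA1, hA2, hA3⟩
      · exact h
      · exfalso
        have h1 := hmx _ (List.mem_map_of_mem htA)
        rw [PySem.Str.len_eq] at h1
        have h2 := hA3.1
        omega
    · have hj : (((min ((s.toList.length : Int)) ((tokens.map PySem.Str.len).foldl max 0 - 1)).toNat : Nat) : Int)
          = min ((s.toList.length : Int)) ((tokens.map PySem.Str.len).foldl max 0 - 1) :=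
        Int.toNat_of_nonneg (by omega)
      obtain ⟨b1, b2⟩ := pvBscan_spec s tokens
        (min ((s.toList.length : Int)) ((tokens.map PySem.Str.len).foldl max 0 - 1)).toNat
        (by rw [hj]; omega)
      rw [hj] at b1 b2
      rcases a2 with hA0 | ⟨tokA, htA, hA1, hA2, hA3⟩
      · rcases b1 with hB0 | ⟨hB1, hB2, hB3⟩
        · omega
        · obtain ⟨tokB, htB, hMB⟩ := hB3
          have := a3 tokB htB _ hB1 (by omega) hMB
          omega
      · have hlA := hmx _ (List.mem_map_of_mem htA)
        rw [PySem.Str.len_eq] at hlA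
        have hMT := hA3.1
        have h1 := b2 _ hA1 (by omega) ⟨tokA, htA, hA3⟩
        rcases b1 with hB0 | ⟨hB1, hB2, hB3⟩
        · omega
        · obtain ⟨tokB, htB, hMB⟩ := hB3
          have h2 := a3 tokB htB _ hB1 (by omega) hMB
          omega
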